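-- pv_equiv track=rewrite | github.com/fknr1337/adpyhwks | regexp/main.py | make_final_data
-- ===== SOURCE A (Python) =====
-- def make_final_data(list):
--     result = []
--
--     for i in range(len(list)):
--         for j in range(len(list)):
--             if list[i][0] == list[j][0]:
--                 list[i] = [x or y for x, y in zip(list[i], list[j])]
--         if list[i] not in result:
--             result.append(list[i])
--     return result
-- ===== SOURCE B (Python) =====
-- def make_final_data(list):
--     # group rows by first element: per key keep the elementwise "first non-zero"
--     # fill vector, truncated (by zip) to the group's minimum row length
--     fills = {}
--     for row in list:
--         key = row[0]
--         if key in fills: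
--             fills[key] = [f or x for f, x in zip(fills[key], row)]
--         else:
--             fills[key] = row[:]
--     result = []
--     seen = set()
--     for row in list:
--         fill = fills[row[0]]
--         merged = [x or f for x, f in zip(row, fill)]
--         t = tuple(merged)
--         if t not in seen:
--             seen.add(t)
--             result.append(merged)
--     return result
-- ===== Notes on version B (the rewrite author's own statement) =====
-- stated objective: alternative
-- what changed: Replaces A's in-place pairwise merging (for each row, rescan all rows and OR key-matching ones into it) by two passes: a dict maps each first-element key to its group's elementwise first-nonzero fill vector (truncated by zip to the group's minimum length), then each row is merged once against its group fill, deduplicated via a seen-set.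
import Mathlib
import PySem

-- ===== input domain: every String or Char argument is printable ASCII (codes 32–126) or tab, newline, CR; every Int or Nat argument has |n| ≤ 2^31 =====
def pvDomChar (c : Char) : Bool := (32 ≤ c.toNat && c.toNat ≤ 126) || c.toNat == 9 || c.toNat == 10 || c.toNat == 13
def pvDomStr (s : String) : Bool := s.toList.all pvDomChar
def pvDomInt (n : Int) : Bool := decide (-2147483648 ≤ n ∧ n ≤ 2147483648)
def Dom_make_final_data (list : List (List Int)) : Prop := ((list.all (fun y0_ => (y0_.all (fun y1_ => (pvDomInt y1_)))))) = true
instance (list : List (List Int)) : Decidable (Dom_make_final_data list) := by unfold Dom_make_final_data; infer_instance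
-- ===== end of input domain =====

-- B replaces A's nested-rescan in-place pairwise OR-merging by two passes over a per-key
-- fill-vector dictionary (objective: alternative). Python A mutates its argument in place;
-- B does not — the equivalence proved here is about the return value only.


-- ===== PORT A =====
-- [x or y for x, y in zip(a, b)]  (Python 'or' on ints: x if x != 0 else y; zip truncates)
def pyOrRow (a b : List Int) : List Int :=
  (a.zip b).map (fun p => if p.1 ≠ 0 then p.1 else p.2)

-- literal port of A's two nested index loops mutating the list plus the membership dedup.
-- list[i] / list[j] are ported as getD with default [] and list[i][0] as headD 0: inside
-- Pre_make_final_data (all rows non-empty; both indices are always in range) this is exact.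
def make_final_data (list : List (List Int)) : List (List Int) :=
  let n := list.length
  ((List.range n).foldl (fun (st : List (List Int) × List (List Int)) i =>
      let lst := (List.range n).foldl (fun (lst : List (List Int)) j =>
          if (lst.getD i []).headD 0 = (lst.getD j []).headD 0 then
            lst.set i (pyOrRow (lst.getD i []) (lst.getD j []))
          else lst) st.1
      (lst, if lst.getD i [] ∈ st.2 then st.2 else st.2 ++ [lst.getD i []]))
    (list, [])).2

-- ===== PORT B =====
-- [f or x for f, x in zip(f, r)] (and [x or f ...]) from Source B
def altOrRow (a b : List Int) : List Int :=
  (a.zip b).map (fun p => if p.1 ≠ 0 then p.1 else p.2)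

-- literal port of Source B: one pass building the per-key fill dict, one pass merging each row
-- against its group fill with a seen-set dedup. row[0] is ported as headD 0 (exact on Pre_).
def make_final_data_alt (list : List (List Int)) : List (List Int) :=
  let fills : PySem.Dict Int (List Int) := list.foldl (fun d row =>
      match d.get? (row.headD 0) with
      | some f => d.insert (row.headD 0) (altOrRow f row)
      | none   => d.insert (row.headD 0) row) PySem.Dict.empty
  (list.foldl (fun (st : List (List Int) × PySem.Set (List Int)) row =>
      let merged := altOrRow row ((fills.get? (row.headD 0)).getD [])
      if merged ∈ st.2 then st else (st.1 ++ [merged], PySem.Set.add st.2 merged))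
    ([], [])).1

-- ===== PRECONDITION & SPEC =====
-- Pre_ excludes exactly the inputs containing an empty row, on which Python A raises
-- IndexError at list[j][0] (and B raises the same at row[0]).
def Pre_make_final_data (list : List (List Int)) : Prop := ∀ r ∈ list, r ≠ []
instance (list : List (List Int)) : Decidable (Pre_make_final_data list) := by unfold Pre_make_final_data; infer_instance

def pvWitness_make_final_data : List (List Int) := [[1, 2, 0], [2, 3], [1, 0, 5]]

def Spec_make_final_data (list : List (List Int)) (out : List (List Int)) : Prop := out = make_final_data_alt list
instance (list : List (List Int)) (out : List (List Int)) : Decidable (Spec_make_final_data list out) := by unfold Spec_make_final_data; infer_instance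

-- ===== CLAIM (what is proved, stated in full; the proofs are below) =====
def Claim_equal_make_final_data : Prop := ∀ (list : List (List Int)), Dom_make_final_data list → Pre_make_final_data list → Spec_make_final_data list (make_final_data list)

-- ===== LEMMAS AND PROOFS =====

-- proof-side vocabulary
def prodOr (a : List Int) (vs : List (List Int)) : List Int := vs.foldl pyOrRow a
def ddp (xs : List (List Int)) : List (List Int) :=
  xs.foldl (fun res x => if x ∈ res then res else res ++ [x]) []
def grp (l : List (List Int)) (k : Int) : List (List Int) := l.filter (fun r => decide (r.headD 0 = k))
def fillD (l : List (List Int)) (k : Int) : List Int :=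
  match grp l k with
  | [] => []
  | h :: t => prodOr h t
def mrg (l : List (List Int)) (r : List Int) : List Int := pyOrRow r (fillD l (r.headD 0))

-- basic algebra of pyOrRow (a left-regular band)
theorem pyOrRow_idem (a : List Int) : pyOrRow a a = a := by
  induction a with
  | nil => rfl
  | cons x a ih =>
    simp only [pyOrRow, List.zip_cons_cons, List.map_cons, List.cons.injEq]
    exact ⟨by split <;> rfl, ih⟩

theorem pyOrRow_assoc (a b c : List Int) : pyOrRow (pyOrRow a b) c = pyOrRow a (pyOrRow b c) := by
  induction a generalizing b c with
  | nil => simp [pyOrRow]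
  | cons x a ih =>
    cases b with
    | nil => simp [pyOrRow]
    | cons y b =>
      cases c with
      | nil => simp [pyOrRow]
      | cons z c =>
        simp only [pyOrRow, List.zip_cons_cons, List.map_cons, List.cons.injEq]
        exact ⟨by split_ifs <;> simp_all, ih b c⟩

theorem pyOrRow_lrb (a b : List Int) : pyOrRow (pyOrRow a b) a = pyOrRow a b := by
  induction a generalizing b with
  | nil => simp [pyOrRow]
  | cons x a ih =>
    cases b with
    | nil => simp [pyOrRow]
    | cons y b =>
      simp only [pyOrRow, List.zip_cons_cons, List.map_cons, List.cons.injEq]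
      exact ⟨by split_ifs <;> simp_all, ih b⟩

theorem pyOrRow_ne_nil {a b : List Int} (ha : a ≠ []) (hb : b ≠ []) : pyOrRow a b ≠ [] := by
  cases a <;> cases b <;> simp_all [pyOrRow]

theorem pyOrRow_key {a b : List Int} (ha : a ≠ []) (hb : b ≠ []) (h : a.headD 0 = b.headD 0) :
    (pyOrRow a b).headD 0 = a.headD 0 := by
  cases a <;> cases b <;> simp_all [pyOrRow]

-- absorption calculus for the band
theorem abs_right (a b : List Int) : pyOrRow (pyOrRow a b) b = pyOrRow a b := by
  rw [pyOrRow_assoc, pyOrRow_idem]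

theorem abs_ext {s b : List Int} (h : pyOrRow s b = s) (c : List Int) :
    pyOrRow (pyOrRow s c) b = pyOrRow s c := by
  conv_lhs => rw [← h]
  rw [pyOrRow_assoc s b c, pyOrRow_assoc s (pyOrRow b c) b, pyOrRow_lrb b c, ← pyOrRow_assoc, h]

theorem abs_congr_left {F b : List Int} (h : pyOrRow F b = F) (r : List Int) :
    pyOrRow (pyOrRow r F) b = pyOrRow r F := by rw [pyOrRow_assoc, h]

theorem abs_join {s g F : List Int} (h1 : pyOrRow s g = s) (h2 : pyOrRow s F = s) :
    pyOrRow s (pyOrRow g F) = s := by rw [← pyOrRow_assoc, h1, h2]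

theorem abs_prodOr (vs : List (List Int)) {s : List Int} (h : ∀ v ∈ vs, pyOrRow s v = s) :
    prodOr s vs = s := by
  induction vs with
  | nil => rfl
  | cons v t ih =>
    have hv : pyOrRow s v = s := h v (by simp)
    show prodOr (pyOrRow s v) t = s
    rw [hv]; exact ih (fun w hw => h w (by simp [hw]))

theorem abs_fold_mono (vs : List (List Int)) : ∀ {s b : List Int}, pyOrRow s b = s →
    pyOrRow (prodOr s vs) b = prodOr s vs := by
  induction vs with
  | nil => exact fun h => h
  | cons v t ih => exact fun h => ih (abs_ext h v)

theorem abs_mem_prodOr (t : List (List Int)) : ∀ {h g : List Int}, g ∈ h :: t →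
    pyOrRow (prodOr h t) g = prodOr h t := by
  induction t with
  | nil => intro h g hg; simp at hg; subst hg; exact pyOrRow_idem g
  | cons v t' ih =>
    intro h g hg
    show pyOrRow (prodOr (pyOrRow h v) t') g = prodOr (pyOrRow h v) t'
    rcases (by simpa using hg : g = h ∨ g = v ∨ g ∈ t') with rfl | rfl | hm
    · exact abs_fold_mono t' (pyOrRow_lrb g v)
    · exact abs_fold_mono t' (abs_right h g)
    · exact ih (by simp [hm])

theorem left_absorb_pre (t : List (List Int)) : ∀ {a s : List Int}, pyOrRow a s = s →
    pyOrRow a (prodOr s t) = prodOr s t := by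
  induction t with
  | nil => exact fun h => h
  | cons v t' ih =>
    intro a s h
    show pyOrRow a (prodOr (pyOrRow s v) t') = prodOr (pyOrRow s v) t'
    exact ih (by rw [← pyOrRow_assoc, h])

theorem left_absorb (a : List Int) (vs : List (List Int)) :
    pyOrRow a (prodOr a vs) = prodOr a vs := by
  cases vs with
  | nil => exact pyOrRow_idem a
  | cons v t =>
    show pyOrRow a (prodOr (pyOrRow a v) t) = prodOr (pyOrRow a v) t
    exact left_absorb_pre t (by rw [← pyOrRow_assoc, pyOrRow_idem])

-- the inner-loop value: r merged with the already-merged prefix of its group, then the raw suffix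
theorem band_cons (r g0 : List Int) (P' Sk : List (List Int)) (F : List Int)
    (hF : F = prodOr g0 (P' ++ r :: Sk)) :
    prodOr (prodOr r ((g0 :: P').map (fun g => pyOrRow g F))) Sk = pyOrRow r F := by
  have habs : ∀ g ∈ g0 :: (P' ++ r :: Sk), pyOrRow F g = F := fun g hg => hF ▸ abs_mem_prodOr _ hg
  have h0 : pyOrRow g0 F = F := hF ▸ left_absorb g0 (P' ++ r :: Sk)
  have hrF : ∀ g ∈ g0 :: (P' ++ r :: Sk), pyOrRow (pyOrRow r F) g = pyOrRow r F :=
    fun g hg => abs_congr_left (habs g hg) r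
  have step1 : prodOr r ((g0 :: P').map (fun g => pyOrRow g F)) = pyOrRow r F := by
    show prodOr (pyOrRow r (pyOrRow g0 F)) (P'.map (fun g => pyOrRow g F)) = pyOrRow r F
    rw [h0]
    exact abs_prodOr _ (by
      intro w hw
      rcases List.mem_map.mp hw with ⟨g, hg, rfl⟩
      exact abs_join (hrF g (by simp [hg])) (abs_congr_left (pyOrRow_idem F) r))
  rw [step1]
  exact abs_prodOr Sk (fun v hv => hrF v (by simp [hv]))

-- named forms of the ports' loop bodies (definitionally equal to the ports)
def stepInner (i : Nat) (lst : List (List Int)) (j : Nat) : List (List Int) :=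
  if (lst.getD i []).headD 0 = (lst.getD j []).headD 0 then
    lst.set i (pyOrRow (lst.getD i []) (lst.getD j [])) else lst

def stepOuter (n : Nat) (st : List (List Int) × List (List Int)) (i : Nat) :
    List (List Int) × List (List Int) :=
  let lst := (List.range n).foldl (stepInner i) st.1
  (lst, if lst.getD i [] ∈ st.2 then st.2 else st.2 ++ [lst.getD i []])

theorem make_final_data_eq (l : List (List Int)) :
    make_final_data l = ((List.range l.length).foldl (stepOuter l.length) (l, [])).2 := rfl

def stepFill (d : PySem.Dict Int (List Int)) (row : List Int) : PySem.Dict Int (List Int) :=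
  match d.get? (row.headD 0) with
  | some f => d.insert (row.headD 0) (altOrRow f row)
  | none   => d.insert (row.headD 0) row

def fillsOf (l : List (List Int)) : PySem.Dict Int (List Int) :=
  l.foldl stepFill PySem.Dict.empty

def stepSeen (fills : PySem.Dict Int (List Int))
    (st : List (List Int) × PySem.Set (List Int)) (row : List Int) :
    List (List Int) × PySem.Set (List Int) :=
  let merged := altOrRow row ((fills.get? (row.headD 0)).getD [])
  if merged ∈ st.2 then st else (st.1 ++ [merged], PySem.Set.add st.2 merged)

theorem make_final_data_alt_eq (l : List (List Int)) :
    make_final_data_alt l = (l.foldl (stepSeen (fillsOf l)) ([], [])).1 := rfl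

-- keys and non-emptiness
theorem prodOr_props (t : List (List Int)) : ∀ {h : List Int}, h ≠ [] →
    (∀ v ∈ t, v ≠ [] ∧ v.headD 0 = h.headD 0) →
    prodOr h t ≠ [] ∧ (prodOr h t).headD 0 = h.headD 0 := by
  induction t with
  | nil => intro h hne _; exact ⟨hne, rfl⟩
  | cons v t' ih =>
    intro h hne hv
    obtain ⟨hv1, hv2⟩ := hv v (by simp)
    have hkey := pyOrRow_key hne hv1 hv2.symm
    have hstep : prodOr h (v :: t') = prodOr (pyOrRow h v) t' := rfl
    have := ih (pyOrRow_ne_nil hne hv1)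
      (fun w hw => ⟨(hv w (by simp [hw])).1, by rw [(hv w (by simp [hw])).2, ← hkey]⟩)
    rw [hstep]
    exact ⟨this.1, by rw [this.2, hkey]⟩

theorem mem_grp {l : List (List Int)} {k : Int} {g : List Int} :
    g ∈ grp l k ↔ g ∈ l ∧ g.headD 0 = k := by simp [grp]

theorem fillD_eq {l : List (List Int)} {k : Int} {h : List Int} {t : List (List Int)}
    (hg : grp l k = h :: t) : fillD l k = prodOr h t := by simp [fillD, hg]

theorem fillD_props {l : List (List Int)} (hpre : ∀ r ∈ l, r ≠ []) {k : Int}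
    {h : List Int} {t : List (List Int)} (hg : grp l k = h :: t) :
    fillD l k ≠ [] ∧ (fillD l k).headD 0 = k := by
  have hh : h ∈ l ∧ h.headD 0 = k := mem_grp.mp (by rw [hg]; simp)
  have ht : ∀ v ∈ t, v ≠ [] ∧ v.headD 0 = h.headD 0 := by
    intro v hv
    have := mem_grp.mp (by rw [hg]; simp [hv] : v ∈ grp l k)
    exact ⟨hpre v this.1, by rw [this.2, hh.2]⟩
  have := prodOr_props t (hpre h hh.1) ht
  rw [fillD_eq hg]
  exact ⟨this.1, by rw [this.2, hh.2]⟩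

theorem grp_cons_of_mem {l : List (List Int)} {r : List Int} (hr : r ∈ l) :
    ∃ h t, grp l (r.headD 0) = h :: t := by
  have : r ∈ grp l (r.headD 0) := mem_grp.mpr ⟨hr, rfl⟩
  rcases hq : grp l (r.headD 0) with _ | ⟨h, t⟩
  · rw [hq] at this; simp at this
  · exact ⟨h, t, rfl⟩

theorem mrg_props {l : List (List Int)} (hpre : ∀ r ∈ l, r ≠ []) {r : List Int} (hr : r ∈ l) :
    mrg l r ≠ [] ∧ (mrg l r).headD 0 = r.headD 0 := by
  obtain ⟨h, t, hg⟩ := grp_cons_of_mem hr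
  obtain ⟨hf1, hf2⟩ := fillD_props hpre hg
  exact ⟨pyOrRow_ne_nil (hpre r hr) hf1, pyOrRow_key (hpre r hr) hf1 hf2.symm⟩

-- merging a row against a list of candidate rows keeps only the key-matching ones
def mergeAll (a : List Int) (vs : List (List Int)) : List Int :=
  vs.foldl (fun a v => if a.headD 0 = v.headD 0 then pyOrRow a v else a) a

theorem mergeAll_eq (vs : List (List Int)) : ∀ {a : List Int} {k : Int}, a ≠ [] →
    a.headD 0 = k → (∀ v ∈ vs, v ≠ []) →
    mergeAll a vs = prodOr a (vs.filter (fun v => decide (v.headD 0 = k))) := by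
  induction vs with
  | nil => intro a k _ _ _; rfl
  | cons v t ih =>
    intro a k hne hk hvs
    by_cases hv : a.headD 0 = v.headD 0
    · have hvk : v.headD 0 = k := by rw [← hv, hk]
      have h1 : mergeAll a (v :: t) = mergeAll (pyOrRow a v) t := by
        unfold mergeAll; rw [List.foldl_cons, if_pos hv]
      have hne' := pyOrRow_ne_nil hne (hvs v (by simp))
      have hk' : (pyOrRow a v).headD 0 = k := by rw [pyOrRow_key hne (hvs v (by simp)) hv, hk]
      rw [h1, ih hne' hk' (fun w hw => hvs w (by simp [hw])),
        List.filter_cons_of_pos (by simpa using hvk)]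
      rfl
    · have hvk : ¬ v.headD 0 = k := by rw [← hk]; exact fun h => hv h.symm
      have h1 : mergeAll a (v :: t) = mergeAll a t := by
        unfold mergeAll; rw [List.foldl_cons, if_neg hv]
      rw [h1, ih hne hk (fun w hw => hvs w (by simp [hw])),
        List.filter_cons_of_neg (by simpa using hvk)]

-- the inner loop as a fold over indices, acting only on position i
def innerIdx (base : List (List Int)) (i : Nat) (a : List Int) (js : List Nat) : List Int :=
  js.foldl (fun a j =>
    let v := if j = i then a else base.getD j []
    if a.headD 0 = v.headD 0 then pyOrRow a v else a) a

theorem innerIdx_append (base : List (List Int)) (i : Nat) (a : List Int) (js1 js2 : List Nat) :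
    innerIdx base i a (js1 ++ js2) = innerIdx base i (innerIdx base i a js1) js2 := by
  simp [innerIdx, List.foldl_append]

theorem innerIdx_self (base : List (List Int)) (i : Nat) (a : List Int) :
    innerIdx base i a [i] = a := by simp [innerIdx, pyOrRow_idem]

theorem innerIdx_no_i {base : List (List Int)} {i : Nat} (js : List Nat)
    (hji : ∀ j ∈ js, j ≠ i) : ∀ a, innerIdx base i a js = mergeAll a (js.map (fun j => base.getD j [])) := by
  induction js with
  | nil => intro a; rfl
  | cons j t ih =>
    intro a
    have hj : j ≠ i := hji j (by simp)
    have h4 : innerIdx base i a (j :: t) =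
        innerIdx base i (if a.headD 0 = (base.getD j []).headD 0
          then pyOrRow a (base.getD j []) else a) t := by
      simp only [innerIdx, List.foldl_cons]
      rw [if_neg hj]
    have h5 : mergeAll a ((j :: t).map (fun j => base.getD j [])) =
        mergeAll (if a.headD 0 = (base.getD j []).headD 0
          then pyOrRow a (base.getD j []) else a) (t.map (fun j => base.getD j [])) := by
      simp only [mergeAll, List.map_cons, List.foldl_cons]
    rw [h4, h5, ih (fun w hw => hji w (by simp [hw]))]

theorem inner_to_idx {base : List (List Int)} {i : Nat} (hi : i < base.length) (js : List Nat) :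
    ∀ a, js.foldl (stepInner i) (base.set i a) = base.set i (innerIdx base i a js) := by
  induction js with
  | nil => intro a; rfl
  | cons j t ih =>
    intro a
    have h1 : (base.set i a).getD i [] = a := by
      rw [List.getD_eq_getElem?_getD, List.getElem?_set]; simp [hi]
    show t.foldl (stepInner i) (stepInner i (base.set i a) j) = _
    by_cases hj : j = i
    · subst hj
      have h3 : stepInner j (base.set j a) j = base.set j a := by
        rw [stepInner, h1]; simp [pyOrRow_idem, List.set_set]
      have h4 : innerIdx base j a (j :: t) = innerIdx base j a t := by
        simp only [innerIdx, List.foldl_cons]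
        simp [pyOrRow_idem]
      rw [h3, ih, h4]
    · have h2 : (base.set i a).getD j [] = base.getD j [] := by
        rw [List.getD_eq_getElem?_getD, List.getElem?_set, if_neg (fun h => hj h.symm),
          ← List.getD_eq_getElem?_getD]
      have h3 : stepInner i (base.set i a) j =
          base.set i (if a.headD 0 = (base.getD j []).headD 0
            then pyOrRow a (base.getD j []) else a) := by
        rw [stepInner, h1, h2]
        by_cases hc : a.headD 0 = (base.getD j []).headD 0
        · rw [if_pos hc, if_pos hc, List.set_set]
        · rw [if_neg hc, if_neg hc]
      have h4 : innerIdx base i a (j :: t) =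
          innerIdx base i (if a.headD 0 = (base.getD j []).headD 0
            then pyOrRow a (base.getD j []) else a) t := by
        simp only [innerIdx, List.foldl_cons]
        rw [if_neg hj]
      rw [h3, ih, h4]

-- the list state after the first i outer iterations: merged prefix, untouched suffix
def stI (l : List (List Int)) (i : Nat) : List (List Int) :=
  (l.take i).map (mrg l) ++ l.drop i

theorem stI_len_take {l : List (List Int)} {i : Nat} (hi : i ≤ l.length) :
    ((l.take i).map (mrg l)).length = i := by simp [hi]

theorem stI_length {l : List (List Int)} {i : Nat} (hi : i ≤ l.length) :
    (stI l i).length = l.length := by simp [stI]; omega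

theorem stI_take {l : List (List Int)} {i : Nat} (hi : i ≤ l.length) :
    (stI l i).take i = (l.take i).map (mrg l) := by
  rw [stI, List.take_append_of_le_length (by rw [stI_len_take hi]),
    List.take_of_length_le (by rw [stI_len_take hi])]

theorem stI_drop {l : List (List Int)} {i : Nat} (hi : i ≤ l.length) :
    (stI l i).drop i = l.drop i := by
  rw [stI, List.drop_append_of_le_length (by rw [stI_len_take hi]),
    List.drop_of_length_le (by rw [stI_len_take hi]), List.nil_append]

theorem stI_set {l : List (List Int)} {i : Nat} (hi : i < l.length) (x : List Int) :
    (stI l i).set i x = (l.take i).map (mrg l) ++ x :: l.drop (i + 1) := by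
  have hlen := stI_len_take (l := l) (le_of_lt hi)
  rw [stI, List.set_append_right _ _ (le_of_eq hlen), hlen, Nat.sub_self,
    List.drop_eq_getElem_cons hi]
  rfl

theorem stI_set_self {l : List (List Int)} {i : Nat} (hi : i < l.length) :
    stI l i = (stI l i).set i (l.getD i []) := by
  rw [stI_set hi, stI, List.drop_eq_getElem_cons hi,
    List.getD_eq_getElem?_getD, List.getElem?_eq_getElem hi]
  rfl

theorem map_range_getD (l : List (List Int)) (d : List Int) :
    ∀ i, i ≤ l.length → (List.range i).map (fun j => l.getD j d) = l.take i := by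
  intro i hi
  induction i with
  | zero => simp
  | succ n ih =>
    have hn : n < l.length := by omega
    have hg : l[n]? = some l[n] := List.getElem?_eq_getElem hn
    rw [List.range_succ, List.map_append, ih (by omega), List.take_add_one, hg]
    simp [List.getD_eq_getElem?_getD, hg]

theorem stI_prefix {l : List (List Int)} {i : Nat} (hi : i ≤ l.length) :
    (List.range i).map (fun j => (stI l i).getD j []) = (l.take i).map (mrg l) := by
  rw [map_range_getD _ _ _ (by rw [stI_length hi]; exact hi), stI_take hi]

theorem stI_suffix {l : List (List Int)} {i : Nat} (hi : i < l.length) :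
    ((List.range (l.length - (i + 1))).map (fun x => (i + 1) + x)).map
      (fun j => (stI l i).getD j []) = l.drop (i + 1) := by
  rw [List.map_map]
  have hdd : (stI l i).drop (i + 1) = l.drop (i + 1) := by
    have h1 : (stI l i).drop (i + 1) = ((stI l i).drop i).drop 1 := by
      rw [List.drop_drop]
    rw [h1, stI_drop (le_of_lt hi), List.drop_drop]
  have hfun : ((fun j => (stI l i).getD j []) ∘ (fun x => (i + 1) + x)) =
      (fun x => ((stI l i).drop (i + 1)).getD x []) := by
    funext x
    simp only [Function.comp, List.getD_eq_getElem?_getD, List.getElem?_drop]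
  rw [hfun, hdd, map_range_getD _ _ _ (le_of_eq (by simp)), List.take_of_length_le (by simp)]

theorem inner_value (l : List (List Int)) (hpre : ∀ r ∈ l, r ≠ []) (i : Nat) (hi : i < l.length) :
    innerIdx (stI l i) i (l.getD i []) (List.range l.length) = mrg l (l.getD i []) := by
  have hrg : l.getD i [] = l[i] := by
    rw [List.getD_eq_getElem?_getD, List.getElem?_eq_getElem hi]; rfl
  obtain ⟨r, hr⟩ : ∃ r, r = l.getD i [] := ⟨_, rfl⟩
  rw [← hr]
  have hr_mem : r ∈ l := by rw [hr, hrg]; exact List.getElem_mem hi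
  have hrne : r ≠ [] := hpre _ hr_mem
  have hsplit : l = l.take i ++ r :: l.drop (i + 1) := by
    conv_lhs => rw [← List.take_append_drop i l]
    rw [List.drop_eq_getElem_cons hi, hr, hrg]
  obtain ⟨h0, t0, hgrp0⟩ := grp_cons_of_mem hr_mem
  obtain ⟨hFne, hFkey⟩ := fillD_props hpre hgrp0
  have hmrgkey : ∀ g ∈ l, (mrg l g).headD 0 = g.headD 0 ∧ mrg l g ≠ [] := by
    intro g hg; exact ⟨(mrg_props hpre hg).2, (mrg_props hpre hg).1⟩
  -- split the index range
  have hrange : List.range l.length =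
      (List.range i ++ [i]) ++ (List.range (l.length - (i + 1))).map (fun x => (i + 1) + x) := by
    have hn : l.length = (i + 1) + (l.length - (i + 1)) := by omega
    rw [← List.range_succ, ← List.range_add, ← hn]
  rw [hrange, innerIdx_append, innerIdx_append, innerIdx_self,
    innerIdx_no_i (List.range i) (fun j hj => by simp at hj; omega),
    stI_prefix (le_of_lt hi),
    innerIdx_no_i _ (fun j hj => by
      simp only [List.mem_map, List.mem_range] at hj
      obtain ⟨x, _, rfl⟩ := hj
      omega),
    stI_suffix hi]
  -- first merge: against the already-merged prefix
  have hstep1 : mergeAll r ((l.take i).map (mrg l)) =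
      prodOr r
        (((l.take i).filter (fun g => decide (g.headD 0 = r.headD 0))).map
          (fun g => pyOrRow g (fillD l (r.headD 0)))) := by
    rw [mergeAll_eq _ hrne rfl (fun v hv => by
      obtain ⟨g, hg, rfl⟩ := List.mem_map.mp hv
      exact (hmrgkey g (List.mem_of_mem_take hg)).2)]
    rw [List.filter_map]
    congr 1
    have hfc : (l.take i).filter ((fun v => decide (v.headD 0 = r.headD 0)) ∘ mrg l) =
        (l.take i).filter (fun g => decide (g.headD 0 = r.headD 0)) := by
      apply List.filter_congr
      intro g hg
      simp only [Function.comp]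
      rw [(hmrgkey g (List.mem_of_mem_take hg)).1]
    rw [hfc]
    apply List.map_congr_left
    intro g hg
    have hgk : g.headD 0 = r.headD 0 := by simpa using (List.of_mem_filter hg)
    rw [mrg, hgk]
  rw [hstep1]
  -- the merged value so far is non-empty with key r.headD 0
  have hmem_or : ∀ w ∈ ((l.take i).filter (fun g => decide (g.headD 0 = r.headD 0))).map
      (fun g => pyOrRow g (fillD l (r.headD 0))), w ≠ [] ∧ w.headD 0 = r.headD 0 := by
    intro w hw
    obtain ⟨g, hg, rfl⟩ := List.mem_map.mp hw
    have hgl : g ∈ l := List.mem_of_mem_take (List.mem_of_mem_filter hg)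
    have hgk : g.headD 0 = r.headD 0 := by simpa using (List.of_mem_filter hg)
    refine ⟨pyOrRow_ne_nil (hpre g hgl) hFne, ?_⟩
    rw [pyOrRow_key (hpre g hgl) hFne (by rw [hgk, hFkey]), hgk]
  have ha1 := prodOr_props _ hrne hmem_or
  -- second merge: against the untouched suffix
  rw [mergeAll_eq _ ha1.1 ha1.2 (fun v hv => hpre v (List.mem_of_mem_drop hv))]
  -- group decomposition
  have hdec : grp l (r.headD 0) =
      ((l.take i).filter (fun g => decide (g.headD 0 = r.headD 0))) ++
      r :: ((l.drop (i + 1)).filter (fun g => decide (g.headD 0 = r.headD 0))) := by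
    conv_lhs => rw [grp, hsplit]
    rw [List.filter_append, List.filter_cons_of_pos (by simp)]
  cases hPk : (l.take i).filter (fun g => decide (g.headD 0 = r.headD 0)) with
  | nil =>
    rw [hPk] at hdec
    have hF : fillD l (r.headD 0) = prodOr r
        ((l.drop (i + 1)).filter (fun g => decide (g.headD 0 = r.headD 0))) := fillD_eq hdec
    rw [List.map_nil, show prodOr r ([] : List (List Int)) = r from rfl, mrg, hF]
    exact (left_absorb _ _).symm
  | cons g0 P' =>
    rw [hPk] at hdec
    have hF : fillD l (r.headD 0) = prodOr g0 (P' ++ r ::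
        ((l.drop (i + 1)).filter (fun g => decide (g.headD 0 = r.headD 0)))) := fillD_eq hdec
    rw [band_cons _ g0 P' _ _ hF, mrg]

theorem ddp_append (xs : List (List Int)) (x : List Int) :
    ddp (xs ++ [x]) = if x ∈ ddp xs then ddp xs else ddp xs ++ [x] := by
  simp [ddp, List.foldl_append]

theorem outer_inv (l : List (List Int)) (hpre : ∀ r ∈ l, r ≠ []) :
    ∀ i, i ≤ l.length →
      (List.range i).foldl (stepOuter l.length) (l, []) =
        (stI l i, ddp ((l.take i).map (mrg l))) := by
  intro i
  induction i with
  | zero => intro _; simp [stI, ddp]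
  | succ n ih =>
    intro hn1
    have hn : n ≤ l.length := by omega
    have hlt : n < l.length := by omega
    have hg : l.getD n [] = l[n] := by
      rw [List.getD_eq_getElem?_getD, List.getElem?_eq_getElem hlt]; rfl
    rw [List.range_succ, List.foldl_append, ih hn, List.foldl_cons, List.foldl_nil]
    have hinner : (List.range l.length).foldl (stepInner n) (stI l n) =
        (stI l n).set n (mrg l (l.getD n [])) := by
      conv_lhs => rw [stI_set_self hlt]
      rw [inner_to_idx (by rw [stI_length hn]; exact hlt), inner_value l hpre n hlt]
    have hgetD : ((stI l n).set n (mrg l (l.getD n []))).getD n [] = mrg l (l.getD n []) := by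
      rw [List.getD_eq_getElem?_getD, List.getElem?_set]
      simp [stI_length hn, hlt]
    have hg2 : l[n]?.getD [] = l[n] := by simp [List.getElem?_eq_getElem hlt]
    have htk : (List.map (mrg l) l).take (n + 1) =
        (List.map (mrg l) l).take n ++ [mrg l l[n]] := by
      rw [List.take_add_one, List.getElem?_map, List.getElem?_eq_getElem hlt]
      rfl
    have hst : (stI l n).set n (mrg l (l.getD n [])) = stI l (n + 1) := by
      rw [stI_set hlt, stI, List.take_add_one, List.getElem?_eq_getElem hlt]
      simp [hg2, htk]
    have htake : (l.take (n + 1)).map (mrg l) = (l.take n).map (mrg l) ++ [mrg l (l.getD n [])] := by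
      rw [List.take_add_one, List.getElem?_eq_getElem hlt]
      simp [hg2, htk]
    simp only [stepOuter]
    rw [hinner, hgetD, hst, htake, ddp_append]

theorem a_eq (l : List (List Int)) (hpre : ∀ r ∈ l, r ≠ []) :
    make_final_data l = ddp (l.map (mrg l)) := by
  rw [make_final_data_eq, outer_inv l hpre l.length (le_refl _)]
  rw [List.take_length]

-- the dictionary of fills computes each group's fold
def acc1 (o : Option (List Int)) (g : List (List Int)) : Option (List Int) :=
  g.foldl (fun o r => some (o.elim r (fun f => pyOrRow f r))) o

theorem acc1_some (g : List (List Int)) : ∀ x, acc1 (some x) g = some (prodOr x g) := by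
  induction g with
  | nil => intro x; rfl
  | cons v t ih => intro x; show acc1 (some (pyOrRow x v)) t = _; rw [ih]; rfl

theorem fills_get (l : List (List Int)) : ∀ (d : PySem.Dict Int (List Int)) (k : Int),
    (l.foldl stepFill d).get? k = acc1 (d.get? k) (grp l k) := by
  induction l with
  | nil => intro d k; rfl
  | cons row t ih =>
    intro d k
    show (t.foldl stepFill (stepFill d row)).get? k = _
    rw [ih]
    by_cases hk : row.headD 0 = k
    · have hgrp : grp (row :: t) k = row :: grp t k := by
        simp only [grp]
        rw [List.filter_cons_of_pos (by simpa using hk)]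
      have hstep : (stepFill d row).get? k =
          some ((d.get? k).elim row (fun f => pyOrRow f row)) := by
        cases hd : d.get? (row.headD 0) with
        | none =>
          simp only [stepFill, hd]
          rw [← hk, hd, PySem.Dict.get?_insert_self]
          rfl
        | some f =>
          simp only [stepFill, hd]
          rw [← hk, hd, PySem.Dict.get?_insert_self]
          rfl
      rw [hgrp, hstep]
      rfl
    · have hgrp : grp (row :: t) k = grp t k := by
        simp only [grp]
        rw [List.filter_cons_of_neg (by simpa using hk)]
      have hne : k ≠ row.headD 0 := fun h => hk h.symm
      have hstep : (stepFill d row).get? k = d.get? k := by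
        cases hd : d.get? (row.headD 0) with
        | none =>
          simp only [stepFill, hd]
          rw [PySem.Dict.get?_insert_of_ne _ _ hne]
        | some f =>
          simp only [stepFill, hd]
          rw [PySem.Dict.get?_insert_of_ne _ _ hne]
      rw [hgrp, hstep]

theorem fillsOf_get {l : List (List Int)} {r : List Int} (hr : r ∈ l) :
    (fillsOf l).get? (r.headD 0) = some (fillD l (r.headD 0)) := by
  obtain ⟨h, t, hg⟩ := grp_cons_of_mem hr
  rw [fillsOf, fills_get, PySem.Dict.get?_empty, hg]
  show acc1 (some h) t = _
  rw [acc1_some, fillD_eq hg]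

-- the seen-set dedup equals list-membership dedup
theorem seen_fold (xs : List (List Int)) :
    ∀ (res : List (List Int)) (seen : PySem.Set (List Int)),
    (∀ x : List Int, x ∈ seen ↔ x ∈ res) →
    (xs.foldl (fun (st : List (List Int) × PySem.Set (List Int)) x =>
        if x ∈ st.2 then st else (st.1 ++ [x], PySem.Set.add st.2 x)) (res, seen)).1 =
    xs.foldl (fun res x => if x ∈ res then res else res ++ [x]) res := by
  induction xs with
  | nil => intro res seen _; rfl
  | cons x t ih =>
    intro res seen hinv
    show (t.foldl _ (if x ∈ seen then (res, seen)
        else (res ++ [x], PySem.Set.add seen x))).1 = t.foldl _ (if x ∈ res then res else res ++ [x])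
    by_cases hx : x ∈ res
    · rw [if_pos ((hinv x).mpr hx), if_pos hx]; exact ih res seen hinv
    · rw [if_neg (fun h => hx ((hinv x).mp h)), if_neg hx]
      exact ih _ _ (fun y => by rw [PySem.Set.mem_add]; simp [hinv y])

theorem alt_eq (l : List (List Int)) : make_final_data_alt l = ddp (l.map (mrg l)) := by
  rw [make_final_data_alt_eq]
  have h1 : l.foldl (stepSeen (fillsOf l)) ([], []) =
      (l.map (fun row => altOrRow row (((fillsOf l).get? (row.headD 0)).getD []))).foldl
        (fun (st : List (List Int) × PySem.Set (List Int)) x =>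
          if x ∈ st.2 then st else (st.1 ++ [x], PySem.Set.add st.2 x)) ([], []) := by
    rw [List.foldl_map]
    rfl
  have h2 : l.map (fun row => altOrRow row (((fillsOf l).get? (row.headD 0)).getD [])) =
      l.map (mrg l) := by
    apply List.map_congr_left
    intro row hrow
    rw [fillsOf_get hrow]
    rfl
  rw [h1, h2, seen_fold _ [] [] (by simp)]
  rfl

theorem make_final_data_spec : Claim_equal_make_final_data := by
  intro l _ hpre
  show make_final_data l = make_final_data_alt l
  rw [a_eq l hpre, alt_eq l]
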